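-- pv_equiv track=rewrite | github.com/Nav1919/AI | Unit 2/1 Panicker Pranav nqueens_backtracking.py | middleOrder
-- ===== SOURCE A (Python) =====
-- def middleOrder(vals):
--     retOrder=list()
--     start=len(vals)//2
--     if len(vals)%2==1:
--         retOrder.append(start)
--         start+=1
--     for i in range(start, len(vals)):
--         retOrder.append(i)
--         retOrder.append(len(vals)-i-1)
--     return retOrder
-- ===== SOURCE B (Python) =====
-- def middleOrder(vals):
--     out = []
--     lo, hi = 0, len(vals) - 1
--     while lo < hi:
--         out.append(lo)
--         out.append(hi)
--         lo += 1
--         hi -= 1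
--     if lo == hi:
--         out.append(lo)
--     out.reverse()
--     return out
-- ===== Notes on version B (the rewrite author's own statement) =====
-- stated objective: alternative
-- what changed: A computes the middle via len//2 and parity and walks outward appending (i, n-1-i) pairs; B walks two pointers from the ends inward appending (lo, hi) pairs and reverses the list once at the end, with no division or parity test.
import Mathlib
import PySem

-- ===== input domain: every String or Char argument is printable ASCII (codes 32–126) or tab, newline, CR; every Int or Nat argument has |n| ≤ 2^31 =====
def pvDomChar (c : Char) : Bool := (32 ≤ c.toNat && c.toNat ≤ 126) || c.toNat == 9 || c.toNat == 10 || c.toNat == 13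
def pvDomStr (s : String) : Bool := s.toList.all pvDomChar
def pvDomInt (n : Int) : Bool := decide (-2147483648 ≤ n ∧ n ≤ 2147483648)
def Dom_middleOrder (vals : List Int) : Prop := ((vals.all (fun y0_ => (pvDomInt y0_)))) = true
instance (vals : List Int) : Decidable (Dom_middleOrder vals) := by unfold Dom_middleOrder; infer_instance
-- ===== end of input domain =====

-- B replaces A's middle-out walk (len//2, parity test, pairs (i, n-1-i)) by a two-pointer
-- ends-inward walk appending (lo, hi) pairs and one final reverse; alternative decomposition, same cost.

-- ===== PORT A =====
def middleOrder (vals : List Int) : List Int :=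
  let n : Int := (vals.length : Int)
  let start0 := PySem.Int.floordiv n 2
  let retOrder : List Int := if PySem.Int.mod n 2 = 1 then [start0] else []
  let start : Int := if PySem.Int.mod n 2 = 1 then start0 + 1 else start0
  (PySem.List.pyRange start n 1).foldl (fun acc i => (acc ++ [i]) ++ [n - i - 1]) retOrder

-- ===== PORT B =====
-- the while loop of Source B: appends lo then hi, moves the pointers inward; middle element if lo = hi
def altLoop (lo hi : Int) (out : List Int) : List Int :=
  if lo < hi then altLoop (lo + 1) (hi - 1) ((out ++ [lo]) ++ [hi])
  else if lo = hi then out ++ [lo] else out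
termination_by (hi - lo).toNat
decreasing_by omega

def middleOrder_alt (vals : List Int) : List Int :=
  (altLoop 0 ((vals.length : Int) - 1) []).reverse

-- ===== PRECONDITION & SPEC =====
def Spec_middleOrder (vals : List Int) (out : List Int) : Prop := out = middleOrder_alt vals
instance (vals : List Int) (out : List Int) : Decidable (Spec_middleOrder vals out) := by unfold Spec_middleOrder; infer_instance

-- ===== CLAIM (what is proved, stated in full; the proofs are below) =====
def Claim_equal_middleOrder : Prop := ∀ (vals : List Int), Dom_middleOrder vals → Spec_middleOrder vals (middleOrder vals)

-- ===== LEMMAS AND PROOFS =====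

-- A's middle prefix and loop start, as closed functions of n (used only in the proofs)
def aBase (n : Int) : List Int := if PySem.Int.mod n 2 = 1 then [PySem.Int.floordiv n 2] else []
def aStart (n : Int) : Int := if PySem.Int.mod n 2 = 1 then PySem.Int.floordiv n 2 + 1 else PySem.Int.floordiv n 2

theorem altLoop_reverse_eq (k : Nat) : ∀ (n lo hi : Int) (out : List Int),
    (hi + 1 - lo).toNat ≤ k → 0 ≤ lo → lo + hi = n - 1 → lo ≤ hi + 1 →
    (altLoop lo hi out).reverse =
      aBase n ++ (PySem.List.pyRange (aStart n) (hi + 1) 1).flatMap (fun i => [i, n - i - 1]) ++ out.reverse := by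
  induction k with
  | zero =>
    intro n lo hi out hk h0 hsum hle
    have hlo : lo = hi + 1 := by omega
    rw [altLoop, if_neg (by omega), if_neg (by omega)]
    have hmod : n % 2 = 0 := by omega
    have hdiv : n / 2 = lo := by omega
    have hb : aBase n = [] := by simp [aBase, hmod]
    have hs : aStart n = lo := by simp [aStart, hmod, hdiv]
    rw [hb, hs, PySem.List.pyRange_one_eq_nil (by omega : hi + 1 ≤ lo)]
    simp
  | succ k ih =>
    intro n lo hi out hk h0 hsum hle
    by_cases hlt : lo < hi
    · rw [altLoop, if_pos hlt]
      rw [ih n (lo + 1) (hi - 1) _ (by omega) (by omega) (by omega) (by omega)]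
      have hstart : aStart n ≤ hi := by
        unfold aStart
        rw [PySem.Int.mod_eq_emod_of_pos (by norm_num : (0:Int) < 2),
            PySem.Int.floordiv_eq_ediv_of_pos (by norm_num : (0:Int) < 2)]
        split_ifs with h <;> omega
      have hrange : PySem.List.pyRange (aStart n) (hi + 1) 1
          = PySem.List.pyRange (aStart n) hi 1 ++ [hi] :=
        PySem.List.pyRange_one_succ_right hstart
      have hlo : lo = n - hi - 1 := by omega
      simp only [hrange, hlo]
      simp
    · by_cases heq : lo = hi
      · rw [altLoop, if_neg (by omega), if_pos heq]
        have hmod : n % 2 = 1 := by omega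
        have hdiv : n / 2 = lo := by omega
        have hb : aBase n = [lo] := by simp [aBase, hmod, hdiv]
        have hs : aStart n = lo + 1 := by simp [aStart, hmod, hdiv]
        rw [hb, hs, PySem.List.pyRange_one_eq_nil (by omega : hi + 1 ≤ lo + 1)]
        simp [heq]
      · have hlo : lo = hi + 1 := by omega
        rw [altLoop, if_neg (by omega), if_neg heq]
        have hmod : n % 2 = 0 := by omega
        have hdiv : n / 2 = lo := by omega
        have hb : aBase n = [] := by simp [aBase, hmod]
        have hs : aStart n = lo := by simp [aStart, hmod, hdiv]
        rw [hb, hs, PySem.List.pyRange_one_eq_nil (by omega : hi + 1 ≤ lo)]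
        simp

theorem middleOrder_eq_base_flatMap (vals : List Int) :
    middleOrder vals
      = aBase (vals.length : Int)
        ++ (PySem.List.pyRange (aStart (vals.length : Int)) (vals.length : Int) 1).flatMap
            (fun i => [i, (vals.length : Int) - i - 1]) := by
  have hfun : (fun (acc : List Int) i => (acc ++ [i]) ++ [(vals.length : Int) - i - 1])
      = (fun (acc : List Int) i => acc ++ [i, (vals.length : Int) - i - 1]) := by
    funext acc i; simp
  unfold middleOrder aBase aStart
  simp only [hfun, PySem.List.foldl_append_eq_flatMap]

-- ===== VERDICT (by name: the statement is the Claim_ definition above) =====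
theorem middleOrder_spec : Claim_equal_middleOrder := by
  intro vals _
  unfold Spec_middleOrder middleOrder_alt
  have h0 : (0:Int) ≤ (vals.length : Int) := by positivity
  rw [altLoop_reverse_eq ((vals.length : Int)).toNat (vals.length : Int) 0
      ((vals.length : Int) - 1) [] (by omega) le_rfl (by ring) (by omega)]
  rw [middleOrder_eq_base_flatMap]
  have h1 : (vals.length : Int) - 1 + 1 = (vals.length : Int) := by ring
  rw [h1]
  simp
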